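-- pv_equiv track=rewrite | github.com/Life4gal/Tetris-AI | Src/AI.py | __get_column_transitions
-- ===== SOURCE A (Python) =====
-- import typing
--
-- def __get_column_transitions(board: typing.List[int], columns: int) -> int:
-- 	"""
-- 	A column transition occurs when an empty cell is adjacent to a filled cell on the same row and vice versa.
-- 	:param board: The AI board
-- 	:param columns: Number of columns in the board
-- 	:return: The total number of column transitions
-- 	"""
-- 	transition = 0
-- 	last_bit = 1
--
-- 	for i in range(columns):
-- 		for row in board:
-- 			bit = (row >> i) & 1
--
-- 			if bit != last_bit:
-- 				transition += 1
--
-- 			last_bit = bit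
--
-- 		last_bit = 1
--
-- 	return transition
-- ===== SOURCE B (Python) =====
-- import typing
--
-- def __get_column_transitions(board: typing.List[int], columns: int) -> int:
-- 	"""Single pass over rows: XOR each row with the previous one (top boundary = all
-- 	filled), mask to the board width, and add the popcount of the difference."""
-- 	if columns <= 0:
-- 		return 0
-- 	mask = (1 << columns) - 1
-- 	prev = mask
-- 	transition = 0
-- 	for row in board:
-- 		transition += bin((prev ^ row) & mask).count('1')
-- 		prev = row
-- 	return transition
-- ===== Notes on version B (the rewrite author's own statement) =====
-- stated objective: faster
-- what changed: Replaces the column-by-column double loop (columns x rows bit probes) by a single pass over rows that XORs each row with the previous one (top boundary = all-ones mask) and adds the popcount of the masked difference.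
import Mathlib
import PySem

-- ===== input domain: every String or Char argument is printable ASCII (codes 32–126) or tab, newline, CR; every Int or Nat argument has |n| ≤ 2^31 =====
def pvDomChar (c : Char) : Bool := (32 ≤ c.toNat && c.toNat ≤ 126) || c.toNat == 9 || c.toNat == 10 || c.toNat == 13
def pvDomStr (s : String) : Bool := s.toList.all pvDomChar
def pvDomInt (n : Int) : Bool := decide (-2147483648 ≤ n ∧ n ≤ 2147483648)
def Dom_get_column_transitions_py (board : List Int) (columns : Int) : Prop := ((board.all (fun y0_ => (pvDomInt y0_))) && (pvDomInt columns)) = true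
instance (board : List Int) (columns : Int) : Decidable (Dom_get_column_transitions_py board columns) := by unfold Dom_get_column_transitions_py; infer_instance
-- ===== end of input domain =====

-- B changes the algorithm: one pass over rows adding the popcount of the masked XOR with
-- the previous row, instead of A's per-column inner loop over the board; measured faster.

-- ===== PORT A =====
-- literal transliteration of A: outer loop over range(columns), inner loop over board,
-- state (transition, last_bit); 'row >> i' is i ≥ 0 here (i ranges over range(columns)),
-- so 'row >>> i.toNat' is exact (Int >>> is Python's arithmetic shift).
def get_column_transitions_py (board : List Int) (columns : Int) : Int :=
  (((PySem.List.pyRange 0 columns 1).foldl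
    (fun (st : Int × Int) i =>
      let st2 := board.foldl
        (fun (st : Int × Int) row =>
          let bit := PySem.Int.band (row >>> i.toNat) 1
          ((if bit ≠ st.2 then st.1 + 1 else st.1), bit)) st
      (st2.1, 1)) (0, 1))).1

-- ===== PORT B =====
-- literal transliteration of Source B; bin(x).count('1') on the nonnegative masked value is
-- PySem.Int.bitCount; '1 << columns' with columns > 0 is '1 <<< columns.toNat'.
def get_column_transitions_py_alt (board : List Int) (columns : Int) : Int :=
  if columns ≤ 0 then 0
  else
    let mask : Int := ((1 : Int) <<< columns.toNat) - 1
    (board.foldl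
      (fun (st : Int × Int) row =>
        (st.1 + (PySem.Int.bitCount (PySem.Int.band (PySem.Int.bxor st.2 row) mask) : Int), row))
      (0, mask)).1

-- ===== PRECONDITION & SPEC =====
def Spec_get_column_transitions_py (board : List Int) (columns : Int) (out : Int) : Prop := out = get_column_transitions_py_alt board columns
instance (board : List Int) (columns : Int) (out : Int) : Decidable (Spec_get_column_transitions_py board columns out) := by unfold Spec_get_column_transitions_py; infer_instance

-- ===== CLAIM (what is proved, stated in full; the proofs are below) =====
def Claim_equal_get_column_transitions_py : Prop := ∀ (board : List Int) (columns : Int), Dom_get_column_transitions_py board columns → Spec_get_column_transitions_py board columns (get_column_transitions_py board columns)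

-- ===== LEMMAS AND PROOFS =====

-- the bit of r at position i, as Python computes it: (r >> i) & 1 = (r >> i) % 2
def pbit (r : Int) (i : Nat) : Int := (r >>> i) % 2

-- A's inner loop, abstracted: transitions contributed by one column i, previous bit p
def colCount (i : Nat) : Int → List Int → Int
  | _, [] => 0
  | p, r :: rs => (if pbit r i ≠ p then 1 else 0) + colCount i (pbit r i) rs

-- B's loop, abstracted: popcounts of masked XORs of consecutive rows, previous row q
def rowCount (mask : Int) : Int → List Int → Int
  | _, [] => 0
  | q, r :: rs => (PySem.Int.bitCount (PySem.Int.band (PySem.Int.bxor q r) mask) : Int) + rowCount mask r rs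

lemma band_one_emod (a : Int) : PySem.Int.band a 1 = a % 2 := by
  rw [PySem.Int.band_one, PySem.Int.mod_eq_emod_of_pos (by norm_num)]

lemma neg_succ_ediv_two (u : Nat) : (-(u : Int) - 1) / 2 = -((u / 2 : Nat) : Int) - 1 := by
  omega

lemma nat_xor_div_two (a b : Nat) : (a ^^^ b) / 2 = a / 2 ^^^ b / 2 := by
  apply Nat.eq_of_testBit_eq; intro i
  simp [Nat.testBit_div_two, Nat.testBit_xor]

lemma nat_xor_mod_two (a b : Nat) : (a ^^^ b) % 2 = if a % 2 = b % 2 then 0 else 1 := by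
  have h1 : (a ^^^ b).testBit 0 = ((a.testBit 0) ^^ (b.testBit 0)) := Nat.testBit_xor ..
  simp only [Nat.testBit_zero] at h1
  rcases Nat.mod_two_eq_zero_or_one a with ha | ha <;> rcases Nat.mod_two_eq_zero_or_one b with hb | hb <;>
    simp [ha, hb] at h1 ⊢ <;> omega

lemma band_mask_aux (d : Int) (n : Nat) (hpos : 0 < n)
    (hand : ∀ x : Nat, x &&& (n - 1) = x % n) :
    PySem.Int.band d ((n : Int) - 1) = d % (n : Int) := by
  rcases le_or_gt 0 d with hd | hd
  · obtain ⟨m, rfl⟩ := Int.eq_ofNat_of_zero_le hd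
    unfold PySem.Int.band
    rw [if_pos (by positivity), if_pos (by omega)]
    rw [show ((m : Int)).toNat = m from by omega, show ((n : Int) - 1).toNat = n - 1 from by omega,
      hand m]
    omega
  · obtain ⟨m, rfl⟩ := Int.eq_negSucc_of_lt_zero hd
    unfold PySem.Int.band
    rw [if_neg (by omega), if_pos (by omega)]
    rw [show (-(Int.negSucc m) - 1).toNat = m from by omega,
      show ((n : Int) - 1).toNat = n - 1 from by omega, Nat.and_comm, hand m]
    have hdecomp : (Int.negSucc m : Int)
        = ((n - 1 - m % n : Nat) : Int) + (n : Int) * (-((m / n : Nat) : Int) - 1) := by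
      have hA : ((m % n : Nat) : Int) + (n : Int) * ((m / n : Nat) : Int) = (m : Int) := by
        exact_mod_cast Nat.mod_add_div m n
      have hlt : m % n < n := Nat.mod_lt m hpos
      rw [Int.negSucc_eq, Nat.cast_sub (by omega), Nat.cast_sub (by omega)]
      push_cast at hA ⊢
      linear_combination hA
    rw [hdecomp, Int.add_mul_emod_self_left, Int.emod_eq_of_lt (by omega) (by omega)]

lemma band_two_pow_sub_one (d : Int) (k : Nat) :
    PySem.Int.band d ((2 : Int) ^ k - 1) = d % ((2 : Int) ^ k) := by
  have h := band_mask_aux d (2 ^ k) (Nat.two_pow_pos k) (fun x => Nat.and_two_pow_sub_one_eq_mod x k)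
  have hc : ((2 ^ k : Nat) : Int) = (2 : Int) ^ k := by push_cast; ring
  rw [hc] at h
  exact h

lemma bxor_negSucc_natCast (a b : Nat) :
    PySem.Int.bxor (a : Int) (Int.negSucc b) = -((a ^^^ b : Nat) : Int) - 1 := by
  unfold PySem.Int.bxor
  rw [if_pos (by positivity), if_neg (by omega)]
  rw [show (-(Int.negSucc b) - 1).toNat = b from by omega, Int.toNat_natCast]

lemma bxor_natCast_negSucc (a b : Nat) :
    PySem.Int.bxor (Int.negSucc a) (b : Int) = -((a ^^^ b : Nat) : Int) - 1 := by
  unfold PySem.Int.bxor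
  rw [if_neg (by omega), if_pos (by positivity)]
  rw [show (-(Int.negSucc a) - 1).toNat = a from by omega, Int.toNat_natCast]

lemma bxor_negSucc_negSucc (a b : Nat) :
    PySem.Int.bxor (Int.negSucc a) (Int.negSucc b) = ((a ^^^ b : Nat) : Int) := by
  unfold PySem.Int.bxor
  rw [if_neg (by omega), if_neg (by omega)]
  rw [show (-(Int.negSucc a) - 1).toNat = a from by omega,
      show (-(Int.negSucc b) - 1).toNat = b from by omega]

lemma bxor_emod_two (q r : Int) :
    PySem.Int.bxor q r % 2 = if q % 2 = r % 2 then 0 else 1 := by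
  rcases le_or_gt 0 q with hq | hq
  · obtain ⟨a, rfl⟩ := Int.eq_ofNat_of_zero_le hq
    rcases le_or_gt 0 r with hr | hr
    · obtain ⟨b, rfl⟩ := Int.eq_ofNat_of_zero_le hr
      rw [PySem.Int.bxor_natCast]
      have hx := nat_xor_mod_two a b
      split at hx <;> split <;> omega
    · obtain ⟨b, rfl⟩ := Int.eq_negSucc_of_lt_zero hr
      rw [bxor_negSucc_natCast]
      have hx := nat_xor_mod_two a b
      simp only [Int.negSucc_eq]
      split at hx <;> split <;> omega
  · obtain ⟨a, rfl⟩ := Int.eq_negSucc_of_lt_zero hq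
    rcases le_or_gt 0 r with hr | hr
    · obtain ⟨b, rfl⟩ := Int.eq_ofNat_of_zero_le hr
      rw [bxor_natCast_negSucc]
      have hx := nat_xor_mod_two a b
      simp only [Int.negSucc_eq]
      split at hx <;> split <;> omega
    · obtain ⟨b, rfl⟩ := Int.eq_negSucc_of_lt_zero hr
      rw [bxor_negSucc_negSucc]
      have hx := nat_xor_mod_two a b
      simp only [Int.negSucc_eq]
      split at hx <;> split <;> omega

lemma bxor_ediv_two (q r : Int) :
    PySem.Int.bxor q r / 2 = PySem.Int.bxor (q / 2) (r / 2) := by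
  have hdiv : ∀ u : Nat, ((u : Int)) / 2 = ((u / 2 : Nat) : Int) := fun u => by omega
  rcases le_or_gt 0 q with hq | hq
  · obtain ⟨a, rfl⟩ := Int.eq_ofNat_of_zero_le hq
    rcases le_or_gt 0 r with hr | hr
    · obtain ⟨b, rfl⟩ := Int.eq_ofNat_of_zero_le hr
      rw [PySem.Int.bxor_natCast, hdiv, hdiv, hdiv, PySem.Int.bxor_natCast, nat_xor_div_two]
    · obtain ⟨b, rfl⟩ := Int.eq_negSucc_of_lt_zero hr
      rw [bxor_negSucc_natCast, neg_succ_ediv_two, hdiv,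
        show (Int.negSucc b : Int) / 2 = Int.negSucc (b / 2) from by
          simp [Int.negSucc_eq]; omega,
        bxor_negSucc_natCast, nat_xor_div_two]
  · obtain ⟨a, rfl⟩ := Int.eq_negSucc_of_lt_zero hq
    rcases le_or_gt 0 r with hr | hr
    · obtain ⟨b, rfl⟩ := Int.eq_ofNat_of_zero_le hr
      rw [bxor_natCast_negSucc, neg_succ_ediv_two, hdiv,
        show (Int.negSucc a : Int) / 2 = Int.negSucc (a / 2) from by
          simp [Int.negSucc_eq]; omega,
        bxor_natCast_negSucc, nat_xor_div_two]
    · obtain ⟨b, rfl⟩ := Int.eq_negSucc_of_lt_zero hr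
      rw [bxor_negSucc_negSucc, hdiv,
        show (Int.negSucc a : Int) / 2 = Int.negSucc (a / 2) from by
          simp [Int.negSucc_eq]; omega,
        show (Int.negSucc b : Int) / 2 = Int.negSucc (b / 2) from by
          simp [Int.negSucc_eq]; omega,
        bxor_negSucc_negSucc, nat_xor_div_two]

lemma bitCount_bit (a b : Int) (ha : a = 0 ∨ a = 1) (hb : 0 ≤ b) :
    (PySem.Int.bitCount (a + 2 * b) : Int) = a + (PySem.Int.bitCount b : Int) := by
  rcases eq_or_lt_of_le (show (0 : Int) ≤ a + 2 * b from by omega) with h0 | hpos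
  · have ha0 : a = 0 := by omega
    have hb0 : b = 0 := by omega
    subst ha0; subst hb0
    norm_num
  · rw [PySem.Int.bitCount_of_pos hpos,
      PySem.Int.mod_eq_emod_of_pos (by norm_num), PySem.Int.floordiv_eq_ediv_of_pos (by norm_num),
      show (a + 2 * b) % 2 = a from by omega, show (a + 2 * b) / 2 = b from by omega]
    push_cast
    omega

lemma emod_two_mul (d b : Int) (hb : 0 < b) :
    d % (2 * b) = d % 2 + 2 * ((d / 2) % b) := by
  have h1 := Int.emod_add_mul_ediv d 2
  have h2 := Int.emod_add_mul_ediv (d / 2) b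
  have h3 : 0 ≤ d % 2 := Int.emod_nonneg d (by norm_num)
  have h4 : d % 2 < 2 := Int.emod_lt_of_pos d (by norm_num)
  have h5 : 0 ≤ (d / 2) % b := Int.emod_nonneg _ (by omega)
  have h6 : (d / 2) % b < b := Int.emod_lt_of_pos _ hb
  have key : d = (d % 2 + 2 * ((d / 2) % b)) + (2 * b) * ((d / 2) / b) := by
    linear_combination -h1 - 2 * h2
  conv_lhs => rw [key]
  rw [Int.add_mul_emod_self_left]
  exact Int.emod_eq_of_lt (by omega) (by omega)

lemma pbit_succ (r : Int) (i : Nat) : pbit r (i + 1) = pbit (r / 2) i := by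
  unfold pbit
  rw [show i + 1 = 1 + i from by omega, Int.shiftRight_add, Int.shiftRight_eq_div_pow r 1]
  norm_num

lemma pbit_zero (x : Int) : pbit x 0 = x % 2 := by
  unfold pbit
  norm_num [Int.shiftRight_eq_div_pow]

lemma bitCount_band_xor (c : Nat) (q r : Int) :
    (PySem.Int.bitCount (PySem.Int.band (PySem.Int.bxor q r) ((2 : Int) ^ c - 1)) : Int)
      = ∑ i ∈ Finset.range c, (if pbit r i ≠ pbit q i then (1 : Int) else 0) := by
  induction c generalizing q r with
  | zero => simp [PySem.Int.band_zero, PySem.Int.bitCount_zero]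
  | succ c ih =>
      have h2c : (0 : Int) < 2 ^ c := by positivity
      rw [band_two_pow_sub_one, show (2 : Int) ^ (c + 1) = 2 * 2 ^ c from by ring,
        emod_two_mul _ _ h2c]
      have hmod := bxor_emod_two q r
      rw [bitCount_bit _ _ (by rw [hmod]; split <;> simp) (Int.emod_nonneg _ (by omega)),
        bxor_ediv_two, ← band_two_pow_sub_one, ih, Finset.sum_range_succ']
      simp only [pbit_succ, pbit_zero]
      rw [hmod]
      by_cases hc0 : q % 2 = r % 2 <;> simp [hc0, Ne.symm, eq_comm, add_comm]

lemma pbit_mask (c i : Nat) (h : i < c) : pbit ((2 : Int) ^ c - 1) i = 1 := by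
  unfold pbit
  rw [Int.shiftRight_eq_div_pow]
  have hc : ((2 ^ c - 1 : Nat) : Int) = (2 : Int) ^ c - 1 := by
    have := Nat.one_le_two_pow (n := c); push_cast [Nat.cast_sub this]; ring
  have hi : ((2 ^ i : Nat) : Int) = ((2 ^ i : Nat) : Int) := rfl
  rw [← hc, show ((2 ^ i : Nat) : Int) = ((2 ^ i : Nat) : Int) from rfl]
  have hdiv : ((2 ^ c - 1 : Nat) : Int) / ((2 ^ i : Nat) : Int) = (((2 ^ c - 1) / 2 ^ i : Nat) : Int) := by
    omega
  have htb : (2 ^ c - 1) / 2 ^ i % 2 = 1 := by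
    have h1 : ((2 : Nat) ^ c - 1).testBit i = decide ((2 ^ c - 1) / 2 ^ i % 2 = 1) :=
      Nat.testBit_eq_decide_div_mod_eq ..
    rw [Nat.testBit_two_pow_sub_one] at h1
    simp [h] at h1
    omega
  rw [hdiv]
  omega

lemma rowCount_eq_sum (c : Nat) (l : List Int) : ∀ q : Int,
    rowCount ((2 : Int) ^ c - 1) q l = ∑ i ∈ Finset.range c, colCount i (pbit q i) l := by
  induction l with
  | nil => intro q; simp [rowCount, colCount]
  | cons r rs ih =>
      intro q
      simp only [rowCount, colCount, bitCount_band_xor, ih r, ← Finset.sum_add_distrib]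

lemma inner_fold_eq (i : Nat) (l : List Int) : ∀ t p : Int,
    (l.foldl (fun (st : Int × Int) (row : Int) =>
        let bit := PySem.Int.band (row >>> i) 1
        ((if bit ≠ st.2 then st.1 + 1 else st.1), bit)) (t, p))
      = (t + colCount i p l, l.foldl (fun _ r => pbit r i) p) := by
  induction l with
  | nil => intro t p; simp [colCount]
  | cons r rs ih =>
      intro t p
      simp only [List.foldl_cons]
      rw [ih, band_one_emod]
      refine Prod.ext ?_ rfl
      show _ = t + ((if pbit r i ≠ p then 1 else 0) + colCount i (pbit r i) rs)
      by_cases h : pbit r i = p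
      · rw [show r >>> i % 2 = p from h, h]; simp
      · simp [h, show ¬ r >>> i % 2 = p from h]; show t + 1 + colCount i (pbit r i) rs = _; ring

lemma b_fold_eq (mask : Int) (l : List Int) : ∀ t q : Int,
    (l.foldl (fun (st : Int × Int) row =>
        (st.1 + (PySem.Int.bitCount (PySem.Int.band (PySem.Int.bxor st.2 row) mask) : Int), row))
      (t, q)).1 = t + rowCount mask q l := by
  induction l with
  | nil => intro t q; simp [rowCount]
  | cons r rs ih => intro t q; simp [rowCount, ih, add_assoc]

lemma outer_fold_eq (board : List Int) (is : List Int) : ∀ t : Int,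
    ((is.foldl (fun (st : Int × Int) i =>
        let st2 := board.foldl
          (fun (st : Int × Int) row =>
            let bit := PySem.Int.band (row >>> i.toNat) 1
            ((if bit ≠ st.2 then st.1 + 1 else st.1), bit)) st
        (st2.1, 1)) (t, 1))).1
      = t + (is.map (fun i => colCount i.toNat 1 board)).sum := by
  induction is with
  | nil => intro t; simp
  | cons i is ih =>
      intro t
      simp only [List.foldl_cons, List.map_cons, List.sum_cons]
      rw [inner_fold_eq]
      rw [ih]
      ring

-- ===== VERDICT (by name: the statement is the Claim_ definition above) =====
theorem get_column_transitions_py_spec : Claim_equal_get_column_transitions_py := by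
  intro board columns _
  unfold Spec_get_column_transitions_py get_column_transitions_py get_column_transitions_py_alt
  by_cases hc : columns ≤ 0
  · rw [if_pos hc, PySem.List.pyRange_one_eq_nil hc]
    simp
  · rw [if_neg hc]
    have hmask : ((1 : Int) <<< columns.toNat) - 1 = (2 : Int) ^ columns.toNat - 1 := by
      simp [Int.shiftLeft_eq]
    simp only [hmask]
    rw [b_fold_eq, rowCount_eq_sum, outer_fold_eq, PySem.List.pyRange_one]
    simp only [List.map_map, Function.comp_def, sub_zero, zero_add, Int.toNat_natCast,
      zero_add]
    rw [show (((List.range columns.toNat).map (fun k => colCount k 1 board)).sum)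
        = ∑ i ∈ Finset.range columns.toNat, colCount i 1 board from rfl]
    refine Finset.sum_congr rfl (fun i hi => ?_)
    rw [pbit_mask _ _ (Finset.mem_range.mp hi)]
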